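-- pv_equiv track=rewrite | github.com/RideGreg/LeetCode | Python/pyramid-transition-matrix.py | pyramidTransition2
-- ===== SOURCE A (Python) =====
-- import collections, itertools
--
-- def pyramidTransition2(bottom, allowed):
--     T = collections.defaultdict(set)
--     for u, v, w in allowed:
--         T[u, v].add(w)
--
--     # Comments can be used to cache intermediate results
--     seen = set()
--     def dfs(A):
--         if len(A) == 1: return True
--         if A in seen: return False
--         seen.add(A)
--         return any(dfs(cand) for cand in build(A, []))
--
--     def build(A, ans, i=0):
--         if i + 1 == len(A):
--             yield "".join(ans)
--         else:
--             for w in T[A[i], A[i + 1]]: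
--                 ans.append(w)
--                 for result in build(A, ans, i + 1):
--                     yield result
--                 ans.pop()
--
--     return dfs(bottom)
-- ===== SOURCE B (Python) =====
-- import collections, itertools
--
-- def pyramidTransition2(bottom, allowed):
--     T = collections.defaultdict(set)
--     for u, v, w in allowed:
--         T[u, v].add(w)
--
--     frontier = {bottom}
--     while frontier and len(next(iter(frontier))) > 1:
--         new = set()
--         for row in frontier:
--             choices = [T[a, b] for a, b in zip(row, row[1:])]
--             for comb in itertools.product(*choices):
--                 new.add("".join(comb))
--         frontier = new
--     return bool(frontier)
-- ===== Notes on version B (the rewrite author's own statement) =====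
-- stated objective: alternative
-- what changed: Replaces the memoized DFS recursion (per-row generator `build` interleaved with a shared `seen` set) by breadth-first level expansion: a frontier set of candidate rows, each level built in one pass via itertools.product over the allowed-block sets of adjacent pairs, returning True when rows shrink to length 1 and False when the frontier empties.
import Mathlib
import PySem

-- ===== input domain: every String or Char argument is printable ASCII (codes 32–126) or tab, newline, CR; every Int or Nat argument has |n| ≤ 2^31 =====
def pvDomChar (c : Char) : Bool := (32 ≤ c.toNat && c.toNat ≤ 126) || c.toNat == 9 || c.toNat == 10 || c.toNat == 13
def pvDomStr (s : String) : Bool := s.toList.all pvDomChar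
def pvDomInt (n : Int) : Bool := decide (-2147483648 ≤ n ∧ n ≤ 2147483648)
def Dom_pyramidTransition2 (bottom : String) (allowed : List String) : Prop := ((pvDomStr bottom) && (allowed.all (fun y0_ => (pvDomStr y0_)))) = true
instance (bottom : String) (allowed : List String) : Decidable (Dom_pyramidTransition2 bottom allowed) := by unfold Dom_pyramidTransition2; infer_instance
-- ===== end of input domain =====

-- B replaces A's memoized DFS recursion by breadth-first level expansion with a frontier set
-- (objective: alternative decomposition, same worst-case cost); proved equal on Pre_ below.

-- ===== PORT A =====
-- T = defaultdict(set); for u, v, w in allowed: T[u, v].add(w)  — this loop is IDENTICAL in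
-- A and in Source B, so both ports share it.  (Entries of length ≠ 3 make Python raise
-- ValueError — such inputs are excluded by Pre_; the fold skips them.)
def pvBuildT (allowed : List String) : PySem.Dict (Char × Char) (PySem.Set Char) :=
  allowed.foldl (fun T s =>
    match s.toList with
    | [u, v, w] => T.insert (u, v) ((T.getD (u, v) PySem.Set.empty).add w)
    | _ => T) PySem.Dict.empty

-- generator build(A, ans, i), materialised in yield order (rows are List Char).
-- Python indexes A[i], A[i+1]; that raises only when i + 1 > len(A) (empty bottom, excluded
-- by Pre_); the final `else []` branch covers exactly that case.
def pvBuildA (T : PySem.Dict (Char × Char) (PySem.Set Char)) (A : List Char)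
    (ans : List Char) (i : Nat) : List (List Char) :=
  if i + 1 = A.length then [ans]
  else if h : i + 1 < A.length then
    ((T.getD (A[i], A[i + 1]) PySem.Set.empty : List Char)).flatMap
      (fun w => pvBuildA T A (ans ++ [w]) (i + 1))
  else []
termination_by A.length - i

mutual
-- def dfs(A): length-1 test, `seen` memo, then any(dfs(cand) for cand in build(A, []));
-- fuel = row length (each recursive call shortens the row by one)
def pvDfsA (T : PySem.Dict (Char × Char) (PySem.Set Char)) :
    Nat → List Char → PySem.Set (List Char) → Bool × PySem.Set (List Char)
  | 0, _, seen => (false, seen)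
  | n + 1, A, seen =>
    if A.length = 1 then (true, seen)
    else if seen.contains A then (false, seen)
    else pvAnyA T n (pvBuildA T A [] 0) (seen.add A)
termination_by n => (n, 0)

-- the `any(…)` loop: short-circuits, threading the mutated `seen` through the calls
def pvAnyA (T : PySem.Dict (Char × Char) (PySem.Set Char)) (n : Nat) :
    List (List Char) → PySem.Set (List Char) → Bool × PySem.Set (List Char)
  | [], seen => (false, seen)
  | c :: cs, seen =>
    let r := pvDfsA T n c seen
    if r.1 then r else pvAnyA T n cs r.2
termination_by cs => (n, cs.length + 1)
end

def pyramidTransition2 (bottom : String) (allowed : List String) : Bool :=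
  (pvDfsA (pvBuildT allowed) bottom.toList.length bottom.toList PySem.Set.empty).1

-- ===== PORT B =====
-- itertools.product(*choices), leftmost factor varying slowest
def pvProduct : List (List Char) → List (List Char)
  | [] => [[]]
  | ch :: rest => ch.flatMap (fun c => (pvProduct rest).map (fun t => c :: t))

-- choices = [T[a, b] for a, b in zip(row, row[1:])]; all next rows of one frontier row
def pvExpandRow (T : PySem.Dict (Char × Char) (PySem.Set Char)) (row : List Char) :
    List (List Char) :=
  pvProduct ((row.zip row.tail).map (fun p => (T.getD (p.1, p.2) PySem.Set.empty : List Char)))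

-- new = set(); for row in frontier: for comb in product(*choices): new.add(''.join(comb))
def pvNextFrontier (T : PySem.Dict (Char × Char) (PySem.Set Char))
    (fr : PySem.Set (List Char)) : PySem.Set (List Char) :=
  fr.foldl (fun s row => (pvExpandRow T row).foldl (fun s c => PySem.Set.add s c) s)
    PySem.Set.empty

-- while frontier and len(next(iter(frontier))) > 1: …; return bool(frontier);
-- fuel = bottom row length (each level shortens the rows by one)
def pvBfsB (T : PySem.Dict (Char × Char) (PySem.Set Char)) :
    Nat → PySem.Set (List Char) → Bool
  | 0, fr => !fr.isEmpty
  | n + 1, fr =>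
    match fr with
    | [] => false
    | r :: rest =>
      if r.length > 1 then pvBfsB T n (pvNextFrontier T (r :: rest)) else true

def pyramidTransition2_alt (bottom : String) (allowed : List String) : Bool :=
  pvBfsB (pvBuildT allowed) bottom.toList.length (PySem.Set.ofList [bottom.toList])

-- ===== PRECONDITION & SPEC =====
-- Pre_ excludes exactly the inputs on which Python A raises: an empty bottom (dfs indexes
-- A[0], A[1] on it → IndexError) and allowed entries of length ≠ 3 (tuple unpacking → ValueError).
def Pre_pyramidTransition2 (bottom : String) (allowed : List String) : Prop :=
  bottom.toList ≠ [] ∧ ∀ s ∈ allowed, s.toList.length = 3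
instance (bottom : String) (allowed : List String) : Decidable (Pre_pyramidTransition2 bottom allowed) := by unfold Pre_pyramidTransition2; infer_instance
def pvWitness_pyramidTransition2 : String × List String := ("bcd", ["bcc", "cde", "cea"])

def Spec_pyramidTransition2 (bottom : String) (allowed : List String) (out : Bool) : Prop := out = pyramidTransition2_alt bottom allowed
instance (bottom : String) (allowed : List String) (out : Bool) : Decidable (Spec_pyramidTransition2 bottom allowed out) := by unfold Spec_pyramidTransition2; infer_instance

-- ===== CLAIM (what is proved, stated in full; the proofs are below) =====
def Claim_equal_pyramidTransition2 : Prop := ∀ (bottom : String) (allowed : List String), Dom_pyramidTransition2 bottom allowed → Pre_pyramidTransition2 bottom allowed → Spec_pyramidTransition2 bottom allowed (pyramidTransition2 bottom allowed)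

-- ===== LEMMAS AND PROOFS =====

-- canonical 'this row can be reduced to a single block', fuel-indexed
def pvGood (T : PySem.Dict (Char × Char) (PySem.Set Char)) : Nat → List Char → Bool
  | 0, _ => false
  | n + 1, A =>
    if A.length = 1 then true else (pvBuildA T A [] 0).any (fun c => pvGood T n c)

theorem pvProduct_length (l : List (List Char)) (t : List Char) (h : t ∈ pvProduct l) :
    t.length = l.length := by
  induction l generalizing t with
  | nil => simp [pvProduct] at h; simp [h]
  | cons c cs ih =>
    simp only [pvProduct, List.mem_flatMap, List.mem_map] at h
    obtain ⟨w, _, t', ht', rfl⟩ := h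
    simp [ih t' ht']

-- build(A, ans, i) is exactly itertools.product of the pair choice-sets, prefixed with ans
theorem pvBuildA_eq_product (T : PySem.Dict (Char × Char) (PySem.Set Char)) (A : List Char) :
    ∀ k ans i, A.length - i = k + 1 →
      pvBuildA T A ans i =
        (pvProduct (((A.drop i).zip (A.drop (i + 1))).map
          (fun p => (T.getD (p.1, p.2) PySem.Set.empty : List Char)))).map
          (fun t => ans ++ t) := by
  intro k
  induction k with
  | zero =>
    intro ans i hk
    have h1 : i + 1 = A.length := by omega
    have h2 : A.drop (i + 1) = [] := List.drop_of_length_le (by omega)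
    rw [pvBuildA, if_pos h1, h2]
    simp [pvProduct]
  | succ k ih =>
    intro ans i hk
    have h1 : i + 1 < A.length := by omega
    have hne : ¬ (i + 1 = A.length) := by omega
    rw [pvBuildA, if_neg hne, dif_pos h1]
    have hd1 : A.drop i = A[i] :: A.drop (i + 1) := List.drop_eq_getElem_cons (by omega)
    have hd2 : A.drop (i + 1) = A[i + 1] :: A.drop (i + 2) := List.drop_eq_getElem_cons h1
    rw [hd1]
    conv_rhs => rw [hd2]
    rw [List.zip_cons_cons, List.map_cons]
    simp only [pvProduct, List.map_flatMap, List.map_map]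
    refine List.flatMap_congr ?_
    intro w _
    rw [ih (ans ++ [w]) (i + 1) (by omega)]
    simp [Function.comp_def]

theorem pvBuildA_length (T : PySem.Dict (Char × Char) (PySem.Set Char)) (A : List Char)
    (ans : List Char) (i : Nat) (c : List Char) (hi : i < A.length)
    (hc : c ∈ pvBuildA T A ans i) : c.length = ans.length + (A.length - 1 - i) := by
  rw [pvBuildA_eq_product T A (A.length - i - 1) ans i (by omega)] at hc
  simp only [List.mem_map] at hc
  obtain ⟨t, ht, rfl⟩ := hc
  have := pvProduct_length _ t ht
  rw [List.length_map, List.length_zip, List.length_drop, List.length_drop] at this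
  simp [this]; omega

theorem pvExpandRow_eq_build (T : PySem.Dict (Char × Char) (PySem.Set Char))
    (row : List Char) (h : 0 < row.length) : pvExpandRow T row = pvBuildA T row [] 0 := by
  rw [pvExpandRow, pvBuildA_eq_product T row (row.length - 1) [] 0 (by omega)]
  simp

theorem mem_foldl_add (l : List (List Char)) (s : PySem.Set (List Char)) (x : List Char) :
    x ∈ l.foldl (fun s c => PySem.Set.add s c) s ↔ x ∈ s ∨ x ∈ l := by
  induction l generalizing s with
  | nil => simp
  | cons c cs ih =>
    simp only [List.foldl_cons, ih, PySem.Set.mem_add, List.mem_cons]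
    tauto

theorem mem_pvNextFrontier (T : PySem.Dict (Char × Char) (PySem.Set Char))
    (fr : PySem.Set (List Char)) (x : List Char) (hl : ∀ r ∈ fr, 0 < r.length) :
    x ∈ pvNextFrontier T fr ↔ ∃ row ∈ fr, x ∈ pvBuildA T row [] 0 := by
  rw [pvNextFrontier]
  have gen : ∀ (l : List (List Char)) (s : PySem.Set (List Char)),
      x ∈ l.foldl (fun s row => (pvExpandRow T row).foldl (fun s c => PySem.Set.add s c) s) s
        ↔ x ∈ s ∨ ∃ row ∈ l, x ∈ pvExpandRow T row := by
    intro l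
    induction l with
    | nil => simp
    | cons r rs ih =>
      intro s
      simp only [List.foldl_cons, ih, mem_foldl_add, List.mem_cons]
      constructor
      · rintro ((h | h) | ⟨row, h1, h2⟩)
        · exact Or.inl h
        · exact Or.inr ⟨r, Or.inl rfl, h⟩
        · exact Or.inr ⟨row, Or.inr h1, h2⟩
      · rintro (h | ⟨row, (rfl | h1), h2⟩)
        · exact Or.inl (Or.inl h)
        · exact Or.inl (Or.inr h2)
        · exact Or.inr ⟨row, h1, h2⟩
  rw [gen]
  constructor
  · rintro (h | ⟨row, hrow, hx⟩)
    · simp [PySem.Set.empty] at h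
    · exact ⟨row, hrow, by rwa [pvExpandRow_eq_build T row (hl row hrow)] at hx⟩
  · rintro ⟨row, hrow, hx⟩
    exact Or.inr ⟨row, hrow, by rwa [pvExpandRow_eq_build T row (hl row hrow)]⟩

-- BFS returns true iff some frontier row is reducible (rows all of length ℓ, fuel ℓ)
theorem pvBfsB_correct (T : PySem.Dict (Char × Char) (PySem.Set Char)) :
    ∀ ℓ (fr : PySem.Set (List Char)), 1 ≤ ℓ → (∀ r ∈ fr, r.length = ℓ) →
      pvBfsB T ℓ fr = fr.any (fun r => pvGood T ℓ r) := by
  intro ℓ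
  induction ℓ with
  | zero => omega
  | succ k ih =>
    intro fr _ hlen
    match fr with
    | [] => rfl
    | r :: rest =>
      have hr : r.length = k + 1 := hlen r (by simp)
      by_cases hk : k = 0
      · subst hk
        have : ¬ (r.length > 1) := by omega
        rw [pvBfsB, if_neg this]
        have : pvGood T 1 r = true := by rw [pvGood, if_pos hr]
        simp [this]
      · have hgt : r.length > 1 := by omega
        have hpos : ∀ r' ∈ (r :: rest : PySem.Set (List Char)), 0 < r'.length := by
          intro r' h; rw [hlen r' h]; omega
        have hnext : ∀ r' ∈ pvNextFrontier T (r :: rest), r'.length = k := by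
          intro r' h
          rw [mem_pvNextFrontier T _ r' hpos] at h
          obtain ⟨row, hrow, hb⟩ := h
          have hrl := hlen row hrow
          have := pvBuildA_length T row [] 0 r' (by omega) hb
          simp [hrl] at this
          omega
        rw [pvBfsB, if_pos hgt, ih (pvNextFrontier T (r :: rest)) (by omega) hnext]
        rw [Bool.eq_iff_iff]
        simp only [List.any_eq_true]
        constructor
        · rintro ⟨c, hc, hg⟩
          rw [mem_pvNextFrontier T _ c hpos] at hc
          obtain ⟨row, hrow, hb⟩ := hc
          refine ⟨row, hrow, ?_⟩
          have hrl := hlen row hrow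
          rw [pvGood, if_neg (by omega)]
          exact List.any_eq_true.mpr ⟨c, hb, hg⟩
        · rintro ⟨row, hrow, hg⟩
          have hrl := hlen row hrow
          rw [pvGood, if_neg (by omega)] at hg
          obtain ⟨c, hb, hgc⟩ := List.any_eq_true.mp hg
          refine ⟨c, ?_, hgc⟩
          rw [mem_pvNextFrontier T _ c hpos]
          exact ⟨row, hrow, hb⟩

-- invariant on the memo set: every recorded row shorter than L is irreducible
def pvInv (T : PySem.Dict (Char × Char) (PySem.Set Char)) (s : PySem.Set (List Char))
    (L : Nat) : Prop := ∀ r ∈ s, r.length < L → pvGood T r.length r = false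

-- DFS with memo computes pvGood; the memo only ever gains rows no longer than the current
-- one, and on a false result records only irreducible rows below that bound
theorem pvDfsA_correct (T : PySem.Dict (Char × Char) (PySem.Set Char)) :
    ∀ n A (seen : PySem.Set (List Char)), 1 ≤ A.length → A.length ≤ n →
      pvInv T seen (A.length + 1) →
      (pvDfsA T n A seen).1 = pvGood T A.length A ∧
      (∀ r ∈ (pvDfsA T n A seen).2, r ∈ seen ∨ r.length ≤ A.length) ∧
      ((pvDfsA T n A seen).1 = false → pvInv T (pvDfsA T n A seen).2 (A.length + 1)) := by
  intro n
  induction n with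
  | zero => intro A seen h1 h2 _; omega
  | succ n ih =>
    have hany : ∀ ℓ, 1 ≤ ℓ → ℓ ≤ n → ∀ (cands : List (List Char)) seen,
        (∀ c ∈ cands, c.length = ℓ) → pvInv T seen (ℓ + 1) →
        (pvAnyA T n cands seen).1 = cands.any (fun c => pvGood T ℓ c) ∧
        (∀ r ∈ (pvAnyA T n cands seen).2, r ∈ seen ∨ r.length ≤ ℓ) ∧
        ((pvAnyA T n cands seen).1 = false → pvInv T (pvAnyA T n cands seen).2 (ℓ + 1)) := by
      intro ℓ hℓ1 hℓn cands
      induction cands with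
      | nil =>
        intro seen _ hinv
        rw [pvAnyA]
        refine ⟨rfl, fun r hr => Or.inl hr, fun _ => hinv⟩
      | cons c cs ihc =>
        intro seen hc hinv
        have hcl : c.length = ℓ := hc c (by simp)
        obtain ⟨d1, d2, d3⟩ := ih c seen (by omega) (by omega) (by rwa [hcl])
        rw [pvAnyA]
        by_cases hb : (pvDfsA T n c seen).1 = true
        · rw [if_pos hb]
          refine ⟨?_, ?_, ?_⟩
          · rw [hb, List.any_cons, ← hcl, ← d1, hb, Bool.true_or]
          · intro r hr
            rcases d2 r hr with h | h
            · exact Or.inl h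
            · exact Or.inr (by omega)
          · intro hf; rw [hb] at hf; exact absurd hf (by simp)
        · rw [if_neg hb]
          have hb' : (pvDfsA T n c seen).1 = false := by
            cases h : (pvDfsA T n c seen).1
            · rfl
            · exact absurd h hb
          have hinv2 : pvInv T (pvDfsA T n c seen).2 (ℓ + 1) := by
            have := d3 hb'
            rwa [hcl] at this
          obtain ⟨e1, e2, e3⟩ := ihc (pvDfsA T n c seen).2 (fun x hx => hc x (by simp [hx])) hinv2
          refine ⟨?_, ?_, e3⟩
          · rw [e1, List.any_cons, ← hcl, ← d1, hb', Bool.false_or]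
          · intro r hr
            rcases e2 r hr with h | h
            · rcases d2 r h with h' | h'
              · exact Or.inl h'
              · exact Or.inr (by omega)
            · exact Or.inr h
    intro A seen h1 h2 hinv
    by_cases hA1 : A.length = 1
    · rw [pvDfsA, if_pos hA1]
      refine ⟨?_, fun r hr => Or.inl hr, fun hf => absurd hf (by simp)⟩
      rw [hA1, pvGood, if_pos hA1]
    · by_cases hmem : seen.contains A = true
      · rw [pvDfsA, if_neg hA1, if_pos hmem]
        refine ⟨?_, fun r hr => Or.inl hr, fun _ => hinv⟩
        exact (hinv A ((PySem.Set.contains_iff seen A).mp hmem) (by omega)).symm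
      · have hA2 : 2 ≤ A.length := by omega
        set ℓ := A.length - 1 with hℓdef
        have hAl : A.length = ℓ + 1 := by omega
        have hcands : ∀ c ∈ pvBuildA T A [] 0, c.length = ℓ := by
          intro c hcm
          have := pvBuildA_length T A [] 0 c (by omega) hcm
          simp at this
          omega
        have hinv' : pvInv T (seen.add A) (ℓ + 1) := by
          intro r hr hrl
          rcases (PySem.Set.mem_add seen A r).mp hr with h | rfl
          · exact hinv r h (by omega)
          · omega
        obtain ⟨e1, e2, e3⟩ := hany ℓ (by omega) (by omega) (pvBuildA T A [] 0) (seen.add A)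
          hcands hinv'
        rw [pvDfsA, if_neg hA1, if_neg hmem]
        have hgood : pvGood T A.length A = (pvBuildA T A [] 0).any (fun c => pvGood T ℓ c) := by
          rw [hAl, pvGood, if_neg (by omega)]
        refine ⟨by rw [e1, hgood], ?_, ?_⟩
        · intro r hr
          rcases e2 r hr with h | h
          · rcases (PySem.Set.mem_add seen A r).mp h with h' | rfl
            · exact Or.inl h'
            · exact Or.inr (by omega)
          · exact Or.inr (by omega)
        · intro hf r hr hrl
          by_cases hsmall : r.length < ℓ + 1
          · exact e3 hf r hr hsmall
          · rcases e2 r hr with h | h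
            · rcases (PySem.Set.mem_add seen A r).mp h with h' | rfl
              · exact hinv r h' (by omega)
              · rw [← hf, e1, hgood]
            · omega

-- ===== VERDICT (by name: the statement is the Claim_ definition above) =====
theorem pyramidTransition2_spec : Claim_equal_pyramidTransition2 := by
  intro bottom allowed _ hpre
  unfold Spec_pyramidTransition2 pyramidTransition2 pyramidTransition2_alt
  obtain ⟨hne, _⟩ := hpre
  have hL : 1 ≤ bottom.toList.length := by
    cases h : bottom.toList with
    | nil => exact absurd h hne
    | cons a l => simp
  have hA := pvDfsA_correct (pvBuildT allowed) bottom.toList.length bottom.toList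
    PySem.Set.empty hL le_rfl (fun r hr => absurd hr (by simp [PySem.Set.empty]))
  have hsingle : (PySem.Set.ofList [bottom.toList]) = [bottom.toList] := rfl
  have hB := pvBfsB_correct (pvBuildT allowed) bottom.toList.length
    (PySem.Set.ofList [bottom.toList]) hL
    (by rw [hsingle]; intro r hr; simp at hr; rw [hr])
  rw [hA.1, hB, hsingle]
  simp
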